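-- pv_equiv track=rewrite | github.com/TaeheeGu/coding-test-practice | SW Expert Academy/D3/1208_[SW 문제해결 기본]1일차-Flatten.py | solve
-- ===== SOURCE A (Python) =====
-- def solve(box, count):
--   result = box[0] - box[-1]
--   for i in range(count):
--     box[0] -= 1
--     box[-1] += 1
--     box.sort(reverse=True)
--     if result == 0 or result == 1:
--       break
--     result = box[0] - box[-1]
--   return result
-- ===== SOURCE B (Python) =====
-- # Histogram-based re-implementation: one counting pass + O(1) per move,
-- # instead of re-sorting the whole list on every move.
-- # Note: A mutates `box` in place (decrement/increment + sort); B does not —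
-- # the equivalence claimed is about the return value only.
-- def solve(box, count):
--     r = box[0] - box[-1]
--     if count <= 0 or r == 0 or r == 1:
--         return r
--     moved = list(box)
--     moved[0] -= 1
--     moved[-1] += 1
--     cnt = {}
--     for v in moved:
--         cnt[v] = cnt.get(v, 0) + 1
--     hi = max(moved)
--     lo = min(moved)
--     g = hi - lo
--     budget = count - 1
--     while budget > 0 and g > 1:
--         cnt[hi] -= 1
--         cnt[hi - 1] = cnt.get(hi - 1, 0) + 1
--         cnt[lo] -= 1
--         cnt[lo + 1] = cnt.get(lo + 1, 0) + 1
--         if cnt[hi] == 0: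
--             hi -= 1
--         if cnt[lo] == 0:
--             lo += 1
--         g = hi - lo
--         budget -= 1
--     return g
-- ===== Notes on version B (the rewrite author's own statement) =====
-- stated objective: faster
-- what changed: B replaces A's per-move full re-sort with a value histogram plus tracked max/min, doing each move in O(1) after a single counting pass (A mutates box in place; B does not - equivalence is about the return value).
import Mathlib
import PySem

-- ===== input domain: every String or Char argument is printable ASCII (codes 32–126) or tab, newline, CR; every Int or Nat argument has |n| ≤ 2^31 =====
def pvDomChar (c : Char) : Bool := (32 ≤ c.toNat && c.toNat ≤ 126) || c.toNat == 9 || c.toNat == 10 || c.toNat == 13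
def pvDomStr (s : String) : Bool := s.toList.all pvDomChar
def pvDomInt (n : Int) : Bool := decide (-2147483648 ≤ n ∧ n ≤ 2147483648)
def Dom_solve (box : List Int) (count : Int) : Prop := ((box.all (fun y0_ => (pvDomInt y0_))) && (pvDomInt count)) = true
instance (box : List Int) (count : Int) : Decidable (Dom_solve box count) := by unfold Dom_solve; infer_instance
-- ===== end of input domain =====

-- B replaces A's per-move full re-sort by a value histogram with tracked max/min;
-- A mutates box in place, B does not: the equivalence claimed is about the return value.

-- ===== PORT A =====
-- the for-loop over range(count): one constructor per remaining iteration; `break` returns result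
def solveLoopA : Nat → List Int → Int → Int
  | 0, _, result => result
  | n+1, box, result =>
    let b1 := PySem.List.pySetD box 0 (PySem.List.pyGetD box 0 0 - 1)
    let b2 := PySem.List.pySetD b1 (-1) (PySem.List.pyGetD b1 (-1) 0 + 1)
    let b3 := PySem.List.sorted b2 (fun x => x) true
    if result = 0 ∨ result = 1 then result
    else solveLoopA n b3 (PySem.List.pyGetD b3 0 0 - PySem.List.pyGetD b3 (-1) 0)

def solve (box : List Int) (count : Int) : Int :=
  let result := PySem.List.pyGetD box 0 0 - PySem.List.pyGetD box (-1) 0    -- box[0] - box[-1]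
  solveLoopA count.toNat box result

-- ===== PORT B =====
-- the while-loop: fuel = budget; each step pours one unit off the max level and onto the min level
-- (cnt[hi] -= 1 / cnt[lo] -= 1 are ported as `modify`, exact since the key is always present)
def solveAltLoop : Nat → PySem.Dict Int Int → Int → Int → Int → Int
  | 0, _, _, _, g => g
  | n+1, cnt, hi, lo, g =>
    if 1 < g then
      let c1 := cnt.modify hi 0 (· - 1)
      let c2 := c1.modify (hi - 1) 0 (· + 1)
      let c3 := c2.modify lo 0 (· - 1)
      let c4 := c3.modify (lo + 1) 0 (· + 1)
      let hi' := if c4.getD hi 0 = 0 then hi - 1 else hi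
      let lo' := if c4.getD lo 0 = 0 then lo + 1 else lo
      solveAltLoop n c4 hi' lo' (hi' - lo')
    else g

def solve_alt (box : List Int) (count : Int) : Int :=
  let r := PySem.List.pyGetD box 0 0 - PySem.List.pyGetD box (-1) 0
  if count ≤ 0 ∨ r = 0 ∨ r = 1 then r
  else
    let m1 := PySem.List.pySetD box 0 (PySem.List.pyGetD box 0 0 - 1)      -- moved[0] -= 1
    let m2 := PySem.List.pySetD m1 (-1) (PySem.List.pyGetD m1 (-1) 0 + 1)  -- moved[-1] += 1
    let cnt := m2.foldl (fun d v => d.insert v (d.getD v 0 + 1)) PySem.Dict.empty  -- counting pass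
    let hi := (PySem.List.max? m2 (fun x => x)).getD 0
    let lo := (PySem.List.min? m2 (fun x => x)).getD 0
    solveAltLoop (count - 1).toNat cnt hi lo (hi - lo)

-- ===== PRECONDITION & SPEC =====
-- Pre_ excludes only the empty list, on which A raises IndexError (box[0]).
def Pre_solve (box : List Int) (count : Int) : Prop := box ≠ []
instance (box : List Int) (count : Int) : Decidable (Pre_solve box count) := by unfold Pre_solve; infer_instance
def pvWitness_solve : List Int × Int := ([5, 2, 1], 3)
def Spec_solve (box : List Int) (count : Int) (out : Int) : Prop := out = solve_alt box count
instance (box : List Int) (count : Int) (out : Int) : Decidable (Spec_solve box count out) := by unfold Spec_solve; infer_instance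

-- ===== CLAIM (what is proved, stated in full; the proofs are below) =====
def Claim_equal_solve : Prop := ∀ (box : List Int) (count : Int), Dom_solve box count → Pre_solve box count → Spec_solve box count (solve box count)

-- ===== LEMMAS AND PROOFS =====

lemma getLast_min (l : List Int) (hne : l ≠ []) (hp : l.Pairwise (fun a b => b ≤ a)) :
    ∀ y ∈ l, l.getLast hne ≤ y := by
  induction l with
  | nil => simp at hne
  | cons a t ih =>
    intro y hy
    rcases List.pairwise_cons.mp hp with ⟨ha, ht⟩
    cases t with
    | nil => simp at hy; simp [hy]
    | cons b u =>
      rw [List.getLast_cons (List.cons_ne_nil _ _)]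
      rcases List.mem_cons.mp hy with rfl | hy'
      · have h1 := ih (List.cons_ne_nil b u) ht ((b::u).getLast (List.cons_ne_nil b u)) (List.getLast_mem _)
        have h2 := ha _ (List.getLast_mem (List.cons_ne_nil b u))
        exact le_trans h1 h2
      · exact ih (List.cons_ne_nil _ _) ht y hy'

lemma head_of_eq_cons {l : List Int} {x : Int} {t : List Int} (h : l = x :: t) (hne : l ≠ []) :
    l.head hne = x := by subst h; rfl

lemma set_length_append (l : List Int) (a b : Int) : (l ++ [a]).set l.length b = l ++ [b] := by
  induction l with
  | nil => rfl
  | cons h t ih => simp [List.set_cons_succ, ih]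

lemma pySetD_neg_one (xs : List Int) (x v : Int) :
    PySem.List.pySetD (xs ++ [x]) (-1) v = xs ++ [v] := by
  have h1 : PySem.List.pyIdx? (xs ++ [x]).length (-1) = some xs.length := by
    have hl : (xs ++ [x]).length = xs.length + 1 := by simp
    rw [PySem.List.pyIdx?, hl]
    norm_num
  simp only [PySem.List.pySetD, PySem.List.pySet?, h1, Option.map_some, Option.getD_some,
    set_length_append]

set_option maxHeartbeats 1000000 in
lemma loop_sim (n : Nat) : ∀ (L : List Int) (cnt : PySem.Dict Int Int) (hi lo : Int)
    (hne : L ≠ [])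
    (hsort : L.Pairwise (fun a b => b ≤ a))
    (hcnt : ∀ v, cnt.getD v 0 = (L.count v : Int))
    (hhi : L.head hne = hi) (hlo : L.getLast hne = lo),
    solveLoopA n L (hi - lo) = solveAltLoop n cnt hi lo (hi - lo) := by
  induction n with
  | zero => intros; rfl
  | succ n ih =>
    intro L cnt hi lo hne hsort hcnt hhi hlo
    have hall_le : ∀ y ∈ L, lo ≤ y := by
      intro y hy; rw [← hlo]; exact getLast_min L hne hsort y hy
    have hgle : lo ≤ hi := by rw [← hhi]; exact hall_le _ (List.head_mem hne)
    by_cases hg : hi - lo = 0 ∨ hi - lo = 1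
    · simp only [solveLoopA, solveAltLoop]
      rw [if_pos hg, if_neg (by omega)]
    · rw [not_or] at hg
      have hg2 : lo + 2 ≤ hi := by omega
      -- decompose L = hi :: mid ++ [lo]
      obtain ⟨a, rest, rfl⟩ := List.exists_cons_of_ne_nil hne
      have ha : a = hi := by simpa using hhi
      subst ha
      have hrne : rest ≠ [] := by
        rintro rfl
        simp at hlo
        omega
      have hrlast : rest.getLast hrne = lo := by
        rw [← hlo, List.getLast_cons hrne]
      obtain ⟨mid, rfl⟩ : ∃ mid, rest = mid ++ [lo] :=
        ⟨rest.dropLast, by rw [← hrlast]; exact (List.dropLast_append_getLast hrne).symm⟩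
      have e1 : PySem.List.pyGetD (a :: (mid ++ [lo])) 0 0 = a := by
        simp [PySem.List.pyGetD_zero_cons]
      have e2 : PySem.List.pySetD (a :: (mid ++ [lo])) 0 (a - 1) = (a - 1) :: (mid ++ [lo]) := by
        simp [PySem.List.pySetD_of_nonneg]
      have e3 : PySem.List.pyGetD ((a - 1) :: (mid ++ [lo])) (-1) 0 = lo := by
        rw [PySem.List.pyGetD_neg_one _ 0 (by simp), List.getLast_cons hrne, hrlast]
      have e4 : PySem.List.pySetD ((a - 1) :: (mid ++ [lo])) (-1) (lo + 1) = (a - 1) :: (mid ++ [lo + 1]) :=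
        pySetD_neg_one ((a - 1) :: mid) lo (lo + 1)
      simp only [solveLoopA, solveAltLoop]
      rw [if_neg (show ¬(a - lo = 0 ∨ a - lo = 1) by omega), if_pos (by omega)]
      rw [e1, e2, e3, e4]
      set m : List Int := (a - 1) :: (mid ++ [lo + 1]) with hm
      set b3 := PySem.List.sorted m (fun x => x) true with hb3def
      set c4 := (((cnt.modify a 0 (· - 1)).modify (a - 1) 0 (· + 1)).modify lo 0 (· - 1)).modify (lo + 1) 0 (· + 1) with hc4def
      have hb3ne : b3 ≠ [] := by rw [hb3def, Ne, PySem.List.sorted_eq_nil_iff]; simp [hm]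
      obtain ⟨bh, bt, hb3⟩ := List.exists_cons_of_ne_nil hb3ne
      have hmem_m : ∀ y, y ∈ m ↔ (y = a - 1 ∨ y ∈ mid ∨ y = lo + 1) := by
        intro y; rw [hm]; simp
      have hmaxm : ∀ y ∈ m, y ≤ bh := by
        have h := PySem.List.key_head_sorted_rev_ge m (fun x => x) (hb3def ▸ hb3)
        simpa using h
      have hbhm : bh ∈ m := by
        have h : bh ∈ b3 := by rw [hb3]; exact List.mem_cons_self
        rw [hb3def] at h; exact (PySem.List.mem_sorted _ _ _ _).mp h
      have hpair : b3.Pairwise (fun x y => y ≤ x) := by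
        have h := PySem.List.sorted_pairwise_rev m (fun x => x)
        rw [hb3def]; simpa using h
      have hminb : ∀ y ∈ b3, b3.getLast hb3ne ≤ y := getLast_min b3 hb3ne hpair
      have hblm : b3.getLast hb3ne ∈ m := by
        exact (PySem.List.mem_sorted m (fun x => x) true _).mp (List.getLast_mem hb3ne)
      have hminm : ∀ y ∈ m, b3.getLast hb3ne ≤ y := by
        intro y hy
        exact hminb y (by rw [hb3def]; exact (PySem.List.mem_sorted _ _ _ _).mpr hy)
      have hmid_le : ∀ y ∈ mid, y ≤ a := by
        rcases List.pairwise_cons.mp hsort with ⟨h1, _⟩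
        intro y hy; exact h1 y (by simp [hy])
      have hmid_ge : ∀ y ∈ mid, lo ≤ y := fun y hy => hall_le y (by simp [hy])
      have hc4 : ∀ v, c4.getD v 0 = (List.count v m : Int) := by
        intro v
        have hcount : (List.count v m : Int) = (List.count v (a :: (mid ++ [lo])) : Int)
            - (if v = a then 1 else 0) + (if v = a - 1 then 1 else 0)
            - (if v = lo then 1 else 0) + (if v = lo + 1 then 1 else 0) := by
          rw [hm]
          simp only [List.count_cons, List.count_append, List.count_nil,
            beq_iff_eq]
          split_ifs <;> push_cast <;> omega
        by_cases hmidlv : (a - 1 : Int) = lo + 1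
        · rw [hcount, hc4def, hmidlv]
          simp only [PySem.Dict.getD_modify, hcnt]
          split_ifs <;> (try subst_vars) <;> omega
        · rw [hcount, hc4def]
          simp only [PySem.Dict.getD_modify, hcnt]
          split_ifs <;> (try subst_vars) <;> omega
      have hca : c4.getD a 0 = (mid.count a : Int) := by
        rw [hc4 a, hm]
        simp only [List.count_cons, List.count_append, List.count_nil,
          beq_iff_eq]
        split_ifs <;> push_cast <;> omega
      have hclo : c4.getD lo 0 = (mid.count lo : Int) := by
        rw [hc4 lo, hm]
        simp only [List.count_cons, List.count_append, List.count_nil,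
          beq_iff_eq]
        split_ifs <;> push_cast <;> omega
      have hbh : bh = (if (mid.count a : Int) = 0 then a - 1 else a) := by
        by_cases hz : mid.count a = 0
        · have hnotmem : a ∉ mid := by rwa [List.count_eq_zero] at hz
          have h1 : bh ≤ a - 1 := by
            rcases (hmem_m bh).mp hbhm with h | h | h
            · omega
            · have hle := hmid_le bh h
              have hne' : bh ≠ a := fun hh => hnotmem (hh ▸ h)
              omega
            · omega
          have h2 : a - 1 ≤ bh := hmaxm (a - 1) (by rw [hm]; exact List.mem_cons_self)
          rw [if_pos (by exact_mod_cast hz)]; omega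
        · have hmem : a ∈ m := by
            rw [hmem_m]; right; left
            exact List.count_pos_iff.mp (Nat.pos_of_ne_zero hz)
          have h1 : a ≤ bh := hmaxm a hmem
          have h2 : bh ≤ a := by
            rcases (hmem_m bh).mp hbhm with h | h | h
            · omega
            · exact hmid_le bh h
            · omega
          rw [if_neg (by exact_mod_cast hz)]; omega
      have hbl : b3.getLast hb3ne = (if (mid.count lo : Int) = 0 then lo + 1 else lo) := by
        by_cases hz : mid.count lo = 0
        · have hnotmem : lo ∉ mid := by rwa [List.count_eq_zero] at hz
          have h1 : lo + 1 ≤ b3.getLast hb3ne := by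
            rcases (hmem_m _).mp hblm with h | h | h
            · omega
            · have hge := hmid_ge _ h
              have hne' : b3.getLast hb3ne ≠ lo := fun hh => hnotmem (hh ▸ h)
              omega
            · omega
          have h2 : b3.getLast hb3ne ≤ lo + 1 := hminm (lo + 1) (by rw [hmem_m]; tauto)
          rw [if_pos (by exact_mod_cast hz)]; omega
        · have hmem : lo ∈ m := by
            rw [hmem_m]; right; left
            exact List.count_pos_iff.mp (Nat.pos_of_ne_zero hz)
          have h1 : b3.getLast hb3ne ≤ lo := hminm lo hmem
          have h2 : lo ≤ b3.getLast hb3ne := by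
            rcases (hmem_m _).mp hblm with h | h | h
            · omega
            · exact hmid_ge _ h
            · omega
          rw [if_neg (by exact_mod_cast hz)]; omega
      have hcnt' : ∀ v, c4.getD v 0 = (List.count v b3 : Int) := by
        intro v
        rw [hc4 v, hb3def]
        exact_mod_cast ((PySem.List.sorted_perm m (fun x => x) true).count_eq v).symm
      have eh : PySem.List.pyGetD b3 0 0 = bh := by rw [hb3]; exact PySem.List.pyGetD_zero_cons _ _ _
      have el : PySem.List.pyGetD b3 (-1) 0 = b3.getLast hb3ne := PySem.List.pyGetD_neg_one _ _ hb3ne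
      rw [eh, el, hca, hclo, hbh, hbl]
      have hhead : b3.head hb3ne = (if (mid.count a : Int) = 0 then a - 1 else a) := by
        rw [← hbh]; exact head_of_eq_cons hb3 hb3ne
      exact ih b3 c4 _ _ hb3ne hpair hcnt' hhead hbl

set_option maxHeartbeats 1000000 in
lemma solve_eq (box : List Int) (count : Int) (hpre : box ≠ []) :
    solve box count = solve_alt box count := by
  unfold solve solve_alt
  by_cases hc : count ≤ 0
  · rw [show count.toNat = 0 from by omega, if_pos (Or.inl hc)]
    rfl
  · have htn : count.toNat = (count - 1).toNat + 1 := by omega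
    rw [htn]
    simp only [solveLoopA]
    by_cases hr : PySem.List.pyGetD box 0 0 - PySem.List.pyGetD box (-1) 0 = 0 ∨
        PySem.List.pyGetD box 0 0 - PySem.List.pyGetD box (-1) 0 = 1
    · rw [if_pos hr, if_pos (Or.inr hr)]
    · rw [if_neg hr, if_neg (by tauto)]
      set m1 := PySem.List.pySetD box 0 (PySem.List.pyGetD box 0 0 - 1) with hm1
      set m2 := PySem.List.pySetD m1 (-1) (PySem.List.pyGetD m1 (-1) 0 + 1) with hm2
      have hm2ne : m2 ≠ [] := by
        intro h
        have h1 : m2.length = box.length := by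
          rw [hm2, hm1, PySem.List.length_pySetD, PySem.List.length_pySetD]
        rw [h] at h1
        exact hpre (List.eq_nil_of_length_eq_zero h1.symm)
      set b3 := PySem.List.sorted m2 (fun x => x) true with hb3def
      have hb3ne : b3 ≠ [] := by rw [hb3def, Ne, PySem.List.sorted_eq_nil_iff]; exact hm2ne
      obtain ⟨bh, bt, hb3⟩ := List.exists_cons_of_ne_nil hb3ne
      have hmaxm : ∀ y ∈ m2, y ≤ bh := by
        have h := PySem.List.key_head_sorted_rev_ge m2 (fun x => x) (hb3def ▸ hb3)
        simpa using h
      have hbhm : bh ∈ m2 := by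
        have h : bh ∈ b3 := by rw [hb3]; exact List.mem_cons_self
        rw [hb3def] at h; exact (PySem.List.mem_sorted _ _ _ _).mp h
      have hpair : b3.Pairwise (fun x y => y ≤ x) := by
        have h := PySem.List.sorted_pairwise_rev m2 (fun x => x)
        rw [hb3def]; simpa using h
      have hblm : b3.getLast hb3ne ∈ m2 :=
        (PySem.List.mem_sorted m2 (fun x => x) true _).mp (List.getLast_mem hb3ne)
      have hminm : ∀ y ∈ m2, b3.getLast hb3ne ≤ y := by
        intro y hy
        exact getLast_min b3 hb3ne hpair y
          (by rw [hb3def]; exact (PySem.List.mem_sorted _ _ _ _).mpr hy)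
      obtain ⟨mx, hmx⟩ : ∃ mx, PySem.List.max? m2 (fun x => x) = some mx := by
        cases h : PySem.List.max? m2 (fun x => x) with
        | none => exact absurd ((PySem.List.max?_eq_none_iff _ _).mp h) hm2ne
        | some mx => exact ⟨mx, rfl⟩
      obtain ⟨mn, hmn⟩ : ∃ mn, PySem.List.min? m2 (fun x => x) = some mn := by
        cases h : PySem.List.min? m2 (fun x => x) with
        | none => exact absurd ((PySem.List.min?_eq_none_iff _ _).mp h) hm2ne
        | some mn => exact ⟨mn, rfl⟩
      have hbh_eq : bh = mx := by
        have h1 : bh ≤ mx := by simpa using PySem.List.max?_isMax hmx bh hbhm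
        have h2 : mx ≤ bh := hmaxm mx (PySem.List.max?_mem hmx)
        omega
      have hbl_eq : b3.getLast hb3ne = mn := by
        have h1 : mn ≤ b3.getLast hb3ne := by simpa using PySem.List.min?_isMin hmn _ hblm
        have h2 : b3.getLast hb3ne ≤ mn := hminm mn (PySem.List.min?_mem hmn)
        omega
      have hcnt : ∀ v, (m2.foldl (fun d v => d.insert v (d.getD v 0 + 1)) PySem.Dict.empty).getD v 0
          = (List.count v b3 : Int) := by
        intro v
        rw [PySem.Dict.foldl_insert_getD_add_one_eq_counter, PySem.Dict.getD_counter, hb3def]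
        exact_mod_cast ((PySem.List.sorted_perm m2 (fun x => x) true).count_eq v).symm
      have eh : PySem.List.pyGetD b3 0 0 = bh := by rw [hb3]; exact PySem.List.pyGetD_zero_cons _ _ _
      have el : PySem.List.pyGetD b3 (-1) 0 = b3.getLast hb3ne := PySem.List.pyGetD_neg_one _ _ hb3ne
      rw [hmx, hmn, eh, el, hbh_eq, hbl_eq]
      simp only [Option.getD_some]
      exact loop_sim (count - 1).toNat b3 _ mx mn hb3ne hpair hcnt
        (hbh_eq ▸ head_of_eq_cons hb3 hb3ne) hbl_eq

-- ===== VERDICT (by name: the statement is the Claim_ definition above) =====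
theorem solve_spec : Claim_equal_solve := by
  intro box count _ hpre
  unfold Spec_solve
  exact solve_eq box count hpre
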